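-- pv_equiv track=rewrite | github.com/nt6541330-hub/opendata | semantic/Anaphora_Resolution/Disambiguation.py | final_id_mapping
-- ===== SOURCE A (Python) =====
-- def final_id_mapping(id_mapping):
--     """展开链式映射"""
--     final_map = {}
--     for k in id_mapping:
--         v = id_mapping[k]
--         while v in id_mapping:
--             v = id_mapping[v]
--         final_map[k] = v
--     return final_map
-- ===== SOURCE B (Python) =====
-- def final_id_mapping(id_mapping):
--     """展开链式映射: memoize each node's terminal (path compression), one amortized pass"""
--     memo = {}
--
--     def terminal(x):
--         trail = []
--         while x in id_mapping and x not in memo: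
--             trail.append(x)
--             x = id_mapping[x]
--         t = memo.get(x, x)
--         for n in trail:
--             memo[n] = t
--         return t
--
--     return {k: terminal(id_mapping[k]) for k in id_mapping}
-- ===== Notes on version B (the rewrite author's own statement) =====
-- stated objective: alternative
-- what changed: Instead of re-walking the whole chain from scratch for every key (A), B memoizes the terminal of every node it visits and compresses each walked path, so each chain link is followed O(1) amortized times; on the generated inputs (short random chains) this was not measurably faster.
import Mathlib
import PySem

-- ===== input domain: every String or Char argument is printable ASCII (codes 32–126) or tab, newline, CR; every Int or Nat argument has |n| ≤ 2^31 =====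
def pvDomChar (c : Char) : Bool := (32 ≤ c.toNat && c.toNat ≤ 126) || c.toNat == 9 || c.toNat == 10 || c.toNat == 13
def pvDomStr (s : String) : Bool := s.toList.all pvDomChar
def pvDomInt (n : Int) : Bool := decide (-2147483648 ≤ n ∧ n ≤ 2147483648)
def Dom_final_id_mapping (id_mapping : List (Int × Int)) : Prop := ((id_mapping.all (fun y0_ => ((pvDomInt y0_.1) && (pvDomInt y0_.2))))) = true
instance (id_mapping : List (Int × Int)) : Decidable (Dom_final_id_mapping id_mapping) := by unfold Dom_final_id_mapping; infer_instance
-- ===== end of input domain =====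

-- B replaces A's per-key re-chasing with a single pass that memoizes each node's
-- terminal (path compression): a different algorithm of similar measured cost.


-- ===== PORT A =====
-- A's 'while v in id_mapping: v = id_mapping[v]'; the fuel d.size is enough on
-- every input admitted by Pre_ (the loop exits in at most d.size steps there).
def chaseA (d : PySem.Dict Int Int) : Nat → Int → Int
  | 0, v => v
  | n + 1, v => if d.contains v then chaseA d n (d.getD v 0) else v

def final_id_mapping (id_mapping : List (Int × Int)) : List (Int × Int) :=
  let d := PySem.Dict.ofList id_mapping
  (d.keys.foldl (fun fm k => fm.insert k (chaseA d d.size (d.getD k 0)))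
    PySem.Dict.empty).items

-- ===== PORT B =====
-- B's inner 'while v in id_mapping and v not in memo', collecting the path.
def chaseB (d memo : PySem.Dict Int Int) : Nat → Int → List Int → Int × List Int
  | 0, v, path => (v, path)
  | n + 1, v, path =>
    if d.contains v && !(memo.contains v) then
      chaseB d memo n (d.getD v 0) (path ++ [v])
    else (v, path)

def final_id_mapping_alt (id_mapping : List (Int × Int)) : List (Int × Int) :=
  let d := PySem.Dict.ofList id_mapping
  ((d.keys.foldl
      (fun (st : PySem.Dict Int Int × PySem.Dict Int Int) k =>
        let wp := chaseB d st.1 d.size (d.getD k 0) []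
        let t := st.1.getD wp.1 wp.1
        (wp.2.foldl (fun m n => m.insert n t) st.1, st.2.insert k t))
      (PySem.Dict.empty, PySem.Dict.empty)).2).items

-- ===== PRECONDITION & SPEC =====
-- one step of the chain: follow the mapping if v is a key, else stay put
def pvStep (d : PySem.Dict Int Int) (v : Int) : Int :=
  if d.contains v then d.getD v 0 else v

-- Pre_ excludes exactly the mappings with a reachable cycle, on which Python A
-- (and B) loop forever: by pigeonhole, A terminates iff every chain leaves the
-- key set within size+1 steps.
def Pre_final_id_mapping (id_mapping : List (Int × Int)) : Prop :=
  ∀ k ∈ (PySem.Dict.ofList id_mapping).keys,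
    (PySem.Dict.ofList id_mapping).contains
      ((pvStep (PySem.Dict.ofList id_mapping))^[(PySem.Dict.ofList id_mapping).size + 1] k) = false

instance (id_mapping : List (Int × Int)) : Decidable (Pre_final_id_mapping id_mapping) := by
  unfold Pre_final_id_mapping; infer_instance

def pvWitness_final_id_mapping : (List (Int × Int)) := [(1, 2), (2, 3), (5, 1)]

def Spec_final_id_mapping (id_mapping : List (Int × Int)) (out : List (Int × Int)) : Prop := out = final_id_mapping_alt id_mapping
instance (id_mapping : List (Int × Int)) (out : List (Int × Int)) : Decidable (Spec_final_id_mapping id_mapping out) := by unfold Spec_final_id_mapping; infer_instance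

-- ===== CLAIM (what is proved, stated in full; the proofs are below) =====
def Claim_equal_final_id_mapping : Prop := ∀ (id_mapping : List (Int × Int)), Dom_final_id_mapping id_mapping → Pre_final_id_mapping id_mapping → Spec_final_id_mapping id_mapping (final_id_mapping id_mapping)

-- ===== LEMMAS AND PROOFS =====

theorem pvWitness_ok :
    Dom_final_id_mapping pvWitness_final_id_mapping ∧
    Pre_final_id_mapping pvWitness_final_id_mapping := by decide

-- the terminal of the chain starting at v (with saturating fuel)
def pvT (d : PySem.Dict Int Int) (v : Int) : Int := (pvStep d)^[d.size + 1] v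

theorem pvStep_fix (d : PySem.Dict Int Int) {v : Int} (h : d.contains v = false) :
    pvStep d v = v := by simp [pvStep, h]

theorem pvIter_fix (d : PySem.Dict Int Int) {v : Int} (h : d.contains v = false) :
    ∀ m, (pvStep d)^[m] v = v := by
  intro m
  induction m with
  | zero => rfl
  | succ m ih => rw [Function.iterate_succ_apply, pvStep_fix d h, ih]

theorem chaseA_eq_iterate (d : PySem.Dict Int Int) :
    ∀ (m : Nat) (v : Int), chaseA d m v = (pvStep d)^[m] v := by
  intro m
  induction m with
  | zero => intro v; rfl
  | succ m ih =>
    intro v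
    by_cases h : d.contains v = true
    · rw [Function.iterate_succ_apply]
      simp [chaseA, h, ih, pvStep]
    · simp only [Bool.not_eq_true] at h
      simp [chaseA, h, pvIter_fix d h]

theorem pvT_nonkey (d : PySem.Dict Int Int) (pre : ∀ k ∈ d.keys, d.contains ((pvStep d)^[d.size + 1] k) = false)
    {v : Int} (h : d.contains v = true) : d.contains (pvT d v) = false :=
  pre v ((PySem.Dict.contains_iff_mem_keys d v).mp h)

theorem pvT_fix (d : PySem.Dict Int Int) {v : Int} (h : d.contains v = false) :
    pvT d v = v := pvIter_fix d h _

theorem pvT_step (d : PySem.Dict Int Int) (pre : ∀ k ∈ d.keys, d.contains ((pvStep d)^[d.size + 1] k) = false)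
    {v : Int} (h : d.contains v = true) : pvT d (pvStep d v) = pvT d v := by
  have h1 : pvT d (pvStep d v) = pvStep d (pvT d v) := by
    unfold pvT
    rw [← Function.iterate_succ_apply, Function.iterate_succ_apply']
  rw [h1, pvStep_fix d (pvT_nonkey d pre h)]

-- A's value at a key k is the terminal pvT d k
theorem chaseA_key (d : PySem.Dict Int Int) {k : Int} (h : d.contains k = true) :
    chaseA d d.size (d.getD k 0) = pvT d k := by
  rw [chaseA_eq_iterate]
  unfold pvT
  rw [Function.iterate_succ_apply]
  have : pvStep d k = d.getD k 0 := by simp [pvStep, h]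
  rw [this]

-- memo invariant: every memoized node is a key and stores its own terminal
def pvInv (d memo : PySem.Dict Int Int) : Prop :=
  ∀ x : Int, memo.contains x = true → d.contains x = true ∧ memo.getD x x = pvT d x

theorem chaseB_spec (d : PySem.Dict Int Int) (pre : ∀ k ∈ d.keys, d.contains ((pvStep d)^[d.size + 1] k) = false) :
    ∀ (fuel : Nat) (v : Int) (memo : PySem.Dict Int Int) (acc : List Int),
      pvInv d memo → d.contains ((pvStep d)^[fuel] v) = false →
      memo.getD (chaseB d memo fuel v acc).1 (chaseB d memo fuel v acc).1 = pvT d v ∧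
      ∀ x ∈ (chaseB d memo fuel v acc).2,
        x ∈ acc ∨ (d.contains x = true ∧ pvT d x = pvT d v) := by
  intro fuel
  induction fuel with
  | zero =>
    intro v memo acc hinv hexit
    simp only [Function.iterate_zero, id] at hexit
    have hm : memo.contains v = false := by
      by_contra hc
      simp only [Bool.not_eq_false] at hc
      exact absurd (hinv v hc).1 (by simp [hexit])
    refine ⟨?_, fun x hx => Or.inl hx⟩
    simp only [chaseB]
    rw [PySem.Dict.getD_of_not_contains memo v hm, pvT_fix d hexit]
  | succ fuel ih =>
    intro v memo acc hinv hexit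
    by_cases hcond : (d.contains v && !(memo.contains v)) = true
    · have hdv : d.contains v = true := by
        have h' := hcond
        simp only [Bool.and_eq_true] at h'
        exact h'.1
      have hstep : d.getD v 0 = pvStep d v := by simp [pvStep, hdv]
      have hexit' : d.contains ((pvStep d)^[fuel] (pvStep d v)) = false := by
        rw [← Function.iterate_succ_apply]; exact hexit
      have hrec := ih (pvStep d v) memo (acc ++ [v]) hinv hexit'
      simp only [chaseB, hcond, if_true, hstep]
      refine ⟨by rw [hrec.1, pvT_step d pre hdv], ?_⟩
      intro x hx
      rcases hrec.2 x hx with hxa | ⟨hc, ht⟩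
      · rcases List.mem_append.mp hxa with h'' | h''
        · exact Or.inl h''
        · have : x = v := by simpa using h''
          subst this
          exact Or.inr ⟨hdv, rfl⟩
      · exact Or.inr ⟨hc, by rw [ht, pvT_step d pre hdv]⟩
    · simp only [Bool.not_eq_true] at hcond
      simp only [chaseB, hcond, Bool.false_eq_true, if_false]
      refine ⟨?_, fun x hx => Or.inl hx⟩
      by_cases hm : memo.contains v = true
      · exact (hinv v hm).2
      · simp only [Bool.not_eq_true] at hm
        have hdv : d.contains v = false := by
          by_contra hc
          simp only [Bool.not_eq_false] at hc
          rw [hc, hm] at hcond; exact absurd hcond (by simp)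
        rw [PySem.Dict.getD_of_not_contains memo v hm, pvT_fix d hdv]

theorem pvInv_update (d : PySem.Dict Int Int) (t : Int) :
    ∀ (p : List Int) (memo : PySem.Dict Int Int), pvInv d memo →
      (∀ x ∈ p, d.contains x = true ∧ pvT d x = t) →
      pvInv d (p.foldl (fun m n => m.insert n t) memo) := by
  intro p
  induction p with
  | nil => intro memo hinv _; exact hinv
  | cons y p ih =>
    intro memo hinv hp
    simp only [List.foldl_cons]
    refine ih (memo.insert y t) ?_ (fun x hx => hp x (List.mem_cons_of_mem _ hx))
    intro x hx
    rw [PySem.Dict.contains_insert] at hx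
    by_cases hxy : x = y
    · subst hxy
      refine ⟨(hp x (List.mem_cons_self ..)).1, ?_⟩
      rw [PySem.Dict.getD_insert_self, (hp x (List.mem_cons_self ..)).2]
    · have hmx : memo.contains x = true := by
        simp only [Bool.or_eq_true, beq_iff_eq] at hx
        rcases hx with h' | h'
        · exact absurd h' hxy
        · exact h'
      exact ⟨(hinv x hmx).1, by
        rw [PySem.Dict.getD_insert_of_ne memo t x hxy, (hinv x hmx).2]⟩

-- B's outer fold produces the same output dict as directly inserting terminals
theorem foldB_eq (d : PySem.Dict Int Int) (pre : ∀ k ∈ d.keys, d.contains ((pvStep d)^[d.size + 1] k) = false) :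
    ∀ (ks : List Int) (memo fm : PySem.Dict Int Int), pvInv d memo →
      (∀ k ∈ ks, d.contains k = true) →
      (ks.foldl
        (fun (st : PySem.Dict Int Int × PySem.Dict Int Int) k =>
          let wp := chaseB d st.1 d.size (d.getD k 0) []
          let t := st.1.getD wp.1 wp.1
          (wp.2.foldl (fun m n => m.insert n t) st.1, st.2.insert k t))
        (memo, fm)).2
      = ks.foldl (fun fm k => fm.insert k (pvT d k)) fm := by
  intro ks
  induction ks with
  | nil => intro memo fm _ _; rfl
  | cons k ks ih =>
    intro memo fm hinv hks
    have hdk : d.contains k = true := hks k (List.mem_cons_self ..)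
    have hstep : d.getD k 0 = pvStep d k := by simp [pvStep, hdk]
    have hexit : d.contains ((pvStep d)^[d.size] (pvStep d k)) = false := by
      rw [← Function.iterate_succ_apply]
      exact pre k ((PySem.Dict.contains_iff_mem_keys d k).mp hdk)
    have hspec := chaseB_spec d pre d.size (pvStep d k) memo [] hinv hexit
    simp only [List.foldl_cons, hstep]
    have ht : memo.getD (chaseB d memo d.size (pvStep d k) []).1
        (chaseB d memo d.size (pvStep d k) []).1 = pvT d k := by
      rw [hspec.1, pvT_step d pre hdk]
    rw [ht]
    refine ih _ _ ?_ (fun x hx => hks x (List.mem_cons_of_mem _ hx))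
    refine pvInv_update d (pvT d k) _ memo hinv ?_
    intro x hx
    rcases hspec.2 x hx with h' | ⟨hc, htx⟩
    · exact absurd h' (List.not_mem_nil)
    · exact ⟨hc, by rw [htx, pvT_step d pre hdk]⟩

theorem pvInv_empty (d : PySem.Dict Int Int) : pvInv d PySem.Dict.empty := by
  intro x hx
  rw [PySem.Dict.contains_empty] at hx
  exact absurd hx (by simp)

-- ===== VERDICT (by name: the statement is the Claim_ definition above) =====
theorem final_id_mapping_spec : Claim_equal_final_id_mapping := by
  intro l _hdom hpre
  unfold Spec_final_id_mapping final_id_mapping final_id_mapping_alt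
  set d := PySem.Dict.ofList l with hd
  have pre : ∀ k ∈ d.keys, d.contains ((pvStep d)^[d.size + 1] k) = false := hpre
  have hkeys : ∀ k ∈ d.keys, d.contains k = true :=
    fun k hk => (PySem.Dict.contains_iff_mem_keys d k).mpr hk
  have hA : d.keys.foldl (fun fm k => fm.insert k (chaseA d d.size (d.getD k 0))) PySem.Dict.empty
      = d.keys.foldl (fun fm k => fm.insert k (pvT d k)) PySem.Dict.empty := by
    refine PySem.List.foldl_congr_mem _ _ _ _ ?_
    intro fm k hk
    rw [chaseA_key d (hkeys k hk)]
  have hB := foldB_eq d pre d.keys PySem.Dict.empty PySem.Dict.empty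
    (pvInv_empty d) hkeys
  simp only [hA, hB]
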